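-- pv_equiv track=rewrite | github.com/Yeansovanvathana/Vathana_Python | Atcodertest/291/C.py | visited_twice
-- ===== SOURCE A (Python) =====
-- def visited_twice(n, s):
--     x, y = 0, 0
--     visited = set([(0, 0)])
--
--     for i in range(n):
--         if s[i] == "R":
--             x += 1
--         elif s[i] == "L":
--             x -= 1
--         elif s[i] == "U":
--             y += 1
--         elif s[i] == "D":
--             y -= 1
--
--         pos = (x, y)
--         if pos in visited:
--             return "Yes"
--
--         visited.add(pos)
--
--     return "No"
-- ===== SOURCE B (Python) =====
-- def visited_twice(n, s):
--     delta = {"R": (1, 0), "L": (-1, 0), "U": (0, 1), "D": (0, -1)}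
--     x, y = 0, 0
--     positions = [(0, 0)]
--     for i in range(n):
--         dx, dy = delta.get(s[i], (0, 0))
--         x += dx
--         y += dy
--         positions.append((x, y))
--     positions.sort()
--     return "Yes" if any(p == q for p, q in zip(positions, positions[1:])) else "No"
-- ===== Notes on version B (the rewrite author's own statement) =====
-- stated objective: alternative
-- what changed: Replaces A's incremental hash-set membership test with early return by materializing all visited positions via a move table, sorting them lexicographically, and detecting a revisit as an adjacent equal pair in the sorted list (sort-then-scan duplicate detection).
-- outside the precondition, e.g. on visited_twice(5, 'RL'): A returns 'Yes', B raises IndexError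
import Mathlib
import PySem

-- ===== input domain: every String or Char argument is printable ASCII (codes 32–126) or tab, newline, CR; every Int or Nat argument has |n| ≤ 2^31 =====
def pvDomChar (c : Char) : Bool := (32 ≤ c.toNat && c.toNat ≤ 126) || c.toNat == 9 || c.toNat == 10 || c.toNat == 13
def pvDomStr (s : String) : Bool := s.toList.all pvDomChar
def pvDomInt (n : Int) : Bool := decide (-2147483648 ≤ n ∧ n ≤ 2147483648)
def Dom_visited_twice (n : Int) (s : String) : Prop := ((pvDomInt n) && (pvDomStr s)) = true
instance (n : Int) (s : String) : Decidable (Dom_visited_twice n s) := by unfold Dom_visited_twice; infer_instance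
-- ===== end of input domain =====

-- B materializes all visited positions with a move table, sorts them lexicographically,
-- and detects a revisit as an adjacent equal pair — instead of A's in-loop set membership.

-- ===== PORT A =====
-- loop of A: for i in range(n) (lazy, like Python's range), branch chain on s[i], early return on revisit.
def goA (s : String) (n : Int) (i x y : Int) (visited : PySem.Set (Int × Int)) : String :=
  if _h : i < n then
    match PySem.Str.pyGet? s i with
    | none => "No"   -- Python raises IndexError here (excluded by Pre_)
    | some c =>
      let xy :=
        if c == 'R' then (x + 1, y)
        else if c == 'L' then (x - 1, y)
        else if c == 'U' then (x, y + 1)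
        else if c == 'D' then (x, y - 1)
        else (x, y)
      if PySem.Set.contains visited xy then "Yes"
      else goA s n (i + 1) xy.1 xy.2 (PySem.Set.add visited xy)
  else "No"
termination_by (n - i).toNat
decreasing_by omega

def visited_twice (n : Int) (s : String) : String :=
  goA s n 0 0 0 (PySem.Set.ofList [((0 : Int), (0 : Int))])

-- ===== PORT B =====
def deltaB : PySem.Dict Char (Int × Int) :=
  ((((PySem.Dict.empty).insert 'R' (1, 0)).insert 'L' (-1, 0)).insert 'U' (0, 1)).insert 'D' (0, -1)

-- build loop of B: for i in range(n) (lazy), append each new position to the list.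
def goB (s : String) (n : Int) (i : Int) (pos : Int × Int) (acc : List (Int × Int)) : List (Int × Int) :=
  if _h : i < n then
    match PySem.Str.pyGet? s i with
    | none => acc   -- Python raises IndexError here (excluded by Pre_)
    | some c =>
      let d := deltaB.getD c (0, 0)
      let pos' := (pos.1 + d.1, pos.2 + d.2)
      goB s n (i + 1) pos' (acc ++ [pos'])
  else acc
termination_by (n - i).toNat
decreasing_by omega

-- positions.sort(); any(p == q for p, q in zip(positions, positions[1:]))
def visited_twice_alt (n : Int) (s : String) : String :=
  let positions := goB s n 0 (0, 0) [((0 : Int), (0 : Int))]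
  let sorted := PySem.List.sorted2 positions Prod.fst Prod.snd
  if (sorted.zip (PySem.List.slice sorted (some 1) none)).any (fun pq => pq.1 == pq.2)
  then "Yes" else "No"

-- ===== PRECONDITION & SPEC =====
-- Pre_ excludes n > len(s): there indexing s[i] raises IndexError in B (and in A too,
-- unless a position repeats before index len(s) is reached, where A returns "Yes" early).
def Pre_visited_twice (n : Int) (s : String) : Prop := n ≤ (s.toList.length : Int)
instance (n : Int) (s : String) : Decidable (Pre_visited_twice n s) := by unfold Pre_visited_twice; infer_instance
def pvWitness_visited_twice : Int × String := (4, "RLUD")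
def Spec_visited_twice (n : Int) (s : String) (out : String) : Prop := out = visited_twice_alt n s
instance (n : Int) (s : String) (out : String) : Decidable (Spec_visited_twice n s out) := by unfold Spec_visited_twice; infer_instance

-- ===== CLAIM (what is proved, stated in full; the proofs are below) =====
def Claim_equal_visited_twice : Prop := ∀ (n : Int) (s : String), Dom_visited_twice n s → Pre_visited_twice n s → Spec_visited_twice n s (visited_twice n s)

-- ===== LEMMAS AND PROOFS =====

-- the strict lexicographic 'before' relation sorted2 uses for key (fst, snd)
def lexlt (a b : Int × Int) : Bool :=
  decide (a.1 < b.1) || (!decide (b.1 < a.1) && decide (a.2 < b.2))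

lemma sorted2_eq_foldl (xs : List (Int × Int)) :
    PySem.List.sorted2 xs Prod.fst Prod.snd
      = xs.foldl (fun acc x => PySem.List.insertBy lexlt x acc) [] := rfl

-- a ≤lex b, as "not (b <lex a)"
lemma lexlt_asymm {a b : Int × Int} (h : lexlt a b = true) : lexlt b a = false := by
  simp only [lexlt, Bool.or_eq_true, Bool.and_eq_true, Bool.not_eq_true', Bool.or_eq_false_iff,
    Bool.and_eq_false_iff, Bool.not_eq_false', decide_eq_false_iff_not, decide_eq_true_iff] at *
  omega

lemma lexlt_antisymm {a b : Int × Int} (h1 : lexlt a b = false) (h2 : lexlt b a = false) :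
    a = b := by
  obtain ⟨a1, a2⟩ := a; obtain ⟨b1, b2⟩ := b
  simp only [lexlt, Bool.or_eq_false_iff, Bool.and_eq_false_iff, Bool.not_eq_false',
    decide_eq_false_iff_not, decide_eq_true_iff] at *
  simp_all [Prod.ext_iff]
  omega

lemma lexlt_le_trans {a b c : Int × Int} (h1 : lexlt b a = false) (h2 : lexlt c b = false) :
    lexlt c a = false := by
  simp only [lexlt, Bool.or_eq_false_iff, Bool.and_eq_false_iff, Bool.not_eq_false',
    decide_eq_false_iff_not, decide_eq_true_iff] at *
  omega

-- insertion keeps the list pairwise ≤lex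
lemma insertBy_pairwise (x : Int × Int) :
    ∀ (ys : List (Int × Int)), ys.Pairwise (fun a b => lexlt b a = false) →
      (PySem.List.insertBy lexlt x ys).Pairwise (fun a b => lexlt b a = false) := by
  intro ys
  induction ys with
  | nil => intro _; simp [PySem.List.insertBy]
  | cons y ys ih =>
    intro h
    rw [List.pairwise_cons] at h
    obtain ⟨hy, hys⟩ := h
    show (if lexlt x y = true then x :: y :: ys else y :: PySem.List.insertBy lexlt x ys).Pairwise _
    split
    · rename_i hxy
      refine List.pairwise_cons.mpr ⟨?_, List.pairwise_cons.mpr ⟨hy, hys⟩⟩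
      intro z hz
      rcases List.mem_cons.mp hz with rfl | hz2
      · exact lexlt_asymm hxy
      · exact lexlt_le_trans (lexlt_asymm hxy) (hy z hz2)
    · rename_i hxy
      rw [Bool.not_eq_true] at hxy
      refine List.pairwise_cons.mpr ⟨?_, ih hys⟩
      intro z hz
      rcases (PySem.List.mem_insertBy lexlt x z ys).mp hz with rfl | hz2
      · exact hxy
      · exact hy z hz2

lemma foldl_insertBy_pairwise (xs : List (Int × Int)) :
    ∀ (acc : List (Int × Int)), acc.Pairwise (fun a b => lexlt b a = false) →
      (xs.foldl (fun acc x => PySem.List.insertBy lexlt x acc) acc).Pairwise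
        (fun a b => lexlt b a = false) := by
  induction xs with
  | nil => intro acc h; simpa using h
  | cons x xs ih =>
    intro acc h
    simp only [List.foldl_cons]
    exact ih _ (insertBy_pairwise x acc h)

-- adjacent-equal scan: on a pairwise-≤lex list it is false iff the list is nodup
lemma adj_scan_nodup :
    ∀ (l : List (Int × Int)), l.Pairwise (fun a b => lexlt b a = false) →
      (((l.zip l.tail).any (fun pq => pq.1 == pq.2)) = false ↔ l.Nodup) := by
  intro l
  induction l with
  | nil => simp
  | cons a rest ih =>
    intro h
    rw [List.pairwise_cons] at h
    obtain ⟨ha, hrest⟩ := h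
    cases rest with
    | nil => simp
    | cons b t =>
      have hbt : (b :: t).Pairwise (fun a b => lexlt b a = false) := hrest
      simp only [List.tail_cons, List.zip_cons_cons, List.any_cons, Bool.or_eq_false_iff,
        beq_eq_false_iff_ne, ne_eq]
      rw [List.pairwise_cons] at hrest
      obtain ⟨hb, _⟩ := hrest
      constructor
      · rintro ⟨hab, hscan⟩
        have hnd : (b :: t).Nodup := (ih hbt).mp hscan
        refine List.nodup_cons.mpr ⟨fun hmem => ?_, hnd⟩
        rcases List.mem_cons.mp hmem with rfl | hmem'
        · exact hab rfl
        · -- a ∈ t: then a ≤lex b (head of rest) and b ≤lex a, so a = b — contradiction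
          exact hab (lexlt_antisymm (hb a hmem') (ha b List.mem_cons_self))
      · intro hnd
        obtain ⟨hnotin, hnd'⟩ := List.nodup_cons.mp hnd
        exact ⟨fun heq => hnotin (heq ▸ List.mem_cons_self), (ih hbt).mpr hnd'⟩

-- goB only appends to its accumulator
lemma goB_append (s : String) (n : Int) :
    ∀ (i : Int) (pos : Int × Int) (acc : List (Int × Int)),
      ∃ t, goB s n i pos acc = acc ++ t := by
  intro i
  induction hk : (n - i).toNat using Nat.strong_induction_on generalizing i with
  | _ k ih =>
    intro pos acc
    rw [goB]
    split
    · rename_i hlt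
      cases h : PySem.Str.pyGet? s i with
      | none => exact ⟨[], by simp⟩
      | some c =>
        obtain ⟨t, ht⟩ := ih (n - (i + 1)).toNat (by omega) (i + 1) rfl _ (acc ++ [_])
        exact ⟨_ :: t, by simpa using ht⟩
    · exact ⟨[], by simp⟩

-- the per-step displacement computed by A's branch chain equals B's table lookup
lemma step_eq (c : Char) (x y : Int) :
    (if c == 'R' then (x + 1, y)
     else if c == 'L' then (x - 1, y)
     else if c == 'U' then (x, y + 1)
     else if c == 'D' then (x, y - 1)
     else (x, y))
    = (x + (deltaB.getD c (0, 0)).1, y + (deltaB.getD c (0, 0)).2) := by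
  simp only [deltaB, PySem.Dict.getD_insert, beq_iff_eq]
  split_ifs <;> simp_all <;> rfl

-- main loop invariant: A's remaining loop answers "Yes" iff B's materialized list has a duplicate
lemma loop_eq (s : String) (n : Int) :
    ∀ (i x y : Int) (ps : List (Int × Int)), ps.Nodup →
      (∀ j : Int, i ≤ j → j < n → (PySem.Str.pyGet? s j).isSome) →
      goA s n i x y ps = (if (goB s n i (x, y) ps).Nodup then "No" else "Yes") := by
  intro i
  induction hk : (n - i).toNat using Nat.strong_induction_on generalizing i with
  | _ k ih =>
    intro x y ps hnd hsome
    rw [goA, goB]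
    split
    · rename_i hlt
      obtain ⟨c, hc⟩ := Option.isSome_iff_exists.mp (hsome i le_rfl hlt)
      simp only [hc]
      rw [step_eq]
      set p := (x + (deltaB.getD c (0, 0)).1, y + (deltaB.getD c (0, 0)).2) with hp
      by_cases hmem : p ∈ ps
      · have : PySem.Set.contains ps p = true := (PySem.Set.contains_iff ps p).mpr hmem
        rw [this]
        simp only [if_true]
        obtain ⟨t, ht⟩ := goB_append s n (i + 1) p (ps ++ [p])
        have hdup : ¬ (ps ++ [p] ++ t).Nodup := by
          intro h
          have := List.Nodup.sublist (by simp : (ps ++ [p]).Sublist (ps ++ [p] ++ t)) h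
          exact (List.disjoint_of_nodup_append this) hmem (by simp)
        rw [ht]
        rw [if_neg (by simpa using hdup)]
      · have hcf : PySem.Set.contains ps p = false := by
          by_contra h
          exact hmem ((PySem.Set.contains_iff ps p).mp (by revert h; cases PySem.Set.contains ps p <;> simp))
        rw [hcf]
        simp only [Bool.false_eq_true, if_false]
        rw [PySem.Set.add_of_not_mem hmem]
        have hnd' : (ps ++ [p]).Nodup := by
          simp [List.nodup_append, hnd]
          exact fun a b hab h => hmem (h ▸ hab)
        have := ih (n - (i + 1)).toNat (by omega) (i + 1) rfl p.1 p.2 (ps ++ [p]) hnd'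
          (fun j h1 h2 => hsome j (by omega) h2)
        simpa using this
    · rfl

-- ===== VERDICT (by name: the statement is the Claim_ definition above) =====
-- on any position list, "duplicate exists" = "sorted-by-lex list has an adjacent equal pair"
lemma dup_check_eq (ps : List (Int × Int)) :
    (if ps.Nodup then "No" else "Yes")
      = (if ((PySem.List.sorted2 ps Prod.fst Prod.snd).zip
              (PySem.List.slice (PySem.List.sorted2 ps Prod.fst Prod.snd) (some 1) none)).any
              (fun pq => pq.1 == pq.2)
         then "Yes" else "No") := by
  have hpair : (PySem.List.sorted2 ps Prod.fst Prod.snd).Pairwise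
      (fun a b => lexlt b a = false) := by
    rw [sorted2_eq_foldl]
    exact foldl_insertBy_pairwise ps [] (by simp)
  have hperm := PySem.List.sorted2_perm ps Prod.fst Prod.snd false
  rw [PySem.List.slice_from_one]
  have key := adj_scan_nodup _ hpair
  by_cases h : ps.Nodup
  · rw [if_pos h, if_neg]
    simp only [Bool.not_eq_true]
    rw [key]
    exact hperm.nodup_iff.mpr h
  · rw [if_neg h, if_pos]
    rw [← Bool.not_eq_false, key]
    exact fun hn => h (hperm.nodup_iff.mp hn)

-- ===== VERDICT (by name: the statement is the Claim_ definition above) =====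
theorem visited_twice_spec : Claim_equal_visited_twice := by
  intro n s _ hpre
  unfold Spec_visited_twice visited_twice visited_twice_alt
  have hsome : ∀ j : Int, (0 : Int) ≤ j → j < n → (PySem.Str.pyGet? s j).isSome := by
    intro j h0 h1
    unfold Pre_visited_twice at hpre
    have h2 : j < (s.length : Int) := by
      have : s.length = s.toList.length := by simp
      omega
    simp [PySem.Str.pyGet?, PySem.Chars.pyGet?, PySem.List.pyGet?, PySem.List.pyIdx?, h0, h2]
  rw [show PySem.Set.ofList [((0 : Int), (0 : Int))] = [((0 : Int), (0 : Int))] from rfl]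
  rw [loop_eq s n 0 0 0 [((0 : Int), (0 : Int))] (by simp) hsome]
  exact dup_check_eq (goB s n 0 (0, 0) [((0 : Int), (0 : Int))])
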